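-- pv_equiv track=rewrite | github.com/pypi-data/pypi-mirror-356 | packages/easyparser/easyparser-0.0.3.tar.gz/easyparser-0.0.3/easyparser/parser/md.py | convert_setext_to_atx
-- ===== SOURCE A (Python) =====
-- def convert_setext_to_atx(markdown: str) -> str:
--     """Convert setext-style headings to ATX-style headings in markdown text.
--
--     Args:
--         markdown: Markdown text with setext headings
--
--     Returns:
--         str: Markdown text with ATX headings
--     """
--     if not markdown:
--         return markdown
--
--     lines = [(each.strip(), each) for each in markdown.split("\n")]
--     result = []
--     i = 0
--     in_code_block = False
--     line_count = len(lines)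
--
--     while i < line_count:
--         if lines[i][0].startswith("```"):
--             in_code_block = not in_code_block
--             result.append(lines[i][1])
--             i += 1
--             continue
--
--         if in_code_block:
--             result.append(lines[i][1])
--             i += 1
--             continue
--
--         if i + 1 < line_count and lines[i][0]:
--             next_line_stripped = lines[i + 1][0]
--
--             if next_line_stripped:
--                 first_char = next_line_stripped[0]
--                 if (first_char == "=" or first_char == "-") and (
--                     next_line_stripped.count(first_char) == len(next_line_stripped)
--                 ):
--
--                     level = 1 if first_char == "=" else 2
--                     result.append(f"{'#' * level} {lines[i][1]}")
--                     i += 2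
--                     continue
--
--         result.append(lines[i][1])
--         i += 1
--
--     return "\n".join(result)
-- ===== SOURCE B (Python) =====
-- def convert_setext_to_atx(markdown: str) -> str:
--     """Single look-back pass: append every line, and when an underline ('===' / '---')
--     follows a usable heading line, rewrite the just-appended line in place."""
--     result = []
--     in_code_block = False
--     candidate = False  # whether result[-1] is usable setext heading text
--     for line in markdown.split("\n"):
--         stripped = line.strip()
--         if stripped.startswith("```"):
--             in_code_block = not in_code_block
--             result.append(line)
--             candidate = False
--         elif in_code_block:
--             result.append(line)
--             candidate = False
--         elif candidate and stripped and stripped == stripped[0] * len(stripped) and stripped[0] in "=-":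
--             level = 1 if stripped[0] == "=" else 2
--             result[-1] = "#" * level + " " + result[-1]
--             candidate = False
--         else:
--             result.append(line)
--             candidate = bool(stripped)
--     return "\n".join(result)
-- ===== Notes on version B (the rewrite author's own statement) =====
-- stated objective: alternative
-- what changed: Replaces A's index-based while loop that looks AHEAD at lines[i+1] and skips it with i += 2 by a single look-BACK pass that appends every line and, on meeting an underline, rewrites the just-appended line in place, tracking a candidate flag.
import Mathlib
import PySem

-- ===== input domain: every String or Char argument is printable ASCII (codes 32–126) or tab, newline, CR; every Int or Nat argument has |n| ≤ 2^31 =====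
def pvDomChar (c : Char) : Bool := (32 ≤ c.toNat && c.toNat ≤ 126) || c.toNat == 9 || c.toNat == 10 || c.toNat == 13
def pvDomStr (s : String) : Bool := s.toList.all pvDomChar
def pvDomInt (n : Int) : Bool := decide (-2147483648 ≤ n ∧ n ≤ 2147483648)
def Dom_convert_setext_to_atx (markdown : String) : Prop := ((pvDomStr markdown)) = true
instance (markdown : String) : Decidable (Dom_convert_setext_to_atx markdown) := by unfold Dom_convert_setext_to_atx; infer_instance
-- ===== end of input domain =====

-- B replaces A's look-ahead/skip while loop by a look-back pass that rewrites the last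
-- emitted line in place (objective: alternative decomposition, same cost).

-- ===== PORT A =====
-- A's while loop over indices i (stepping by 1 or by 2) is transcribed as structural
-- recursion peeling one or two (stripped, original) pairs; in_code_block is the Bool state.
def goA : List (List Char × List Char) → Bool → List (List Char)
  | [], _ => []
  | (s, orig) :: rest, inCode =>
    if PySem.Chars.startswith s ['`', '`', '`'] then
      orig :: goA rest (!inCode)
    else if inCode then
      orig :: goA rest inCode
    else
      match hr : rest with
      | (ns, norig) :: rest2 =>
        if s ≠ [] then
          match ns.head? with
          | some c =>
            if (c = '=' ∨ c = '-') ∧ PySem.Chars.count ns [c] = ns.length then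
              (List.replicate (if c = '=' then 1 else 2) '#' ++ ' ' :: orig) :: goA rest2 inCode
            else orig :: goA rest inCode
          | none => orig :: goA rest inCode
        else orig :: goA rest inCode
      | [] => orig :: goA rest inCode
termination_by l _ => l.length
decreasing_by all_goals (simp_all; try omega)

def convert_setext_to_atx (markdown : String) : String :=
  if markdown = "" then markdown
  else
    String.ofList (PySem.Chars.join ['\n']
      (goA ((PySem.Chars.splitOn markdown.toList ['\n']).map (fun e => (PySem.Chars.strip e, e))) false))

-- ===== PORT B =====
-- stripped == stripped[0] * len(stripped) with stripped[0] in "=-" (underline test of Source B)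
def pvIsUnd : List Char → Bool
  | [] => false
  | c :: t => decide (c :: t = List.replicate (t.length + 1) c) && (decide (c = '=') || decide (c = '-'))

-- result[-1] = "#" * level + " " + result[-1]  (acc holds result reversed, so its head is result[-1])
def pvConvertLast (s : List Char) (acc : List (List Char)) : List (List Char) :=
  match acc with
  | prev :: t => (List.replicate (if s.head? = some '=' then 1 else 2) '#' ++ ' ' :: prev) :: t
  | [] => []

-- Source B's for loop: accumulator = reversed result, code-block flag, candidate flag
def goB : List (List Char) → List (List Char) → Bool → Bool → List (List Char)
  | acc, [], _, _ => acc.reverse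
  | acc, line :: rest, inCode, cand =>
    let s := PySem.Chars.strip line
    if PySem.Chars.startswith s ['`', '`', '`'] then
      goB (line :: acc) rest (!inCode) false
    else if inCode then
      goB (line :: acc) rest inCode false
    else if cand && pvIsUnd s then
      goB (pvConvertLast s acc) rest inCode false
    else
      goB (line :: acc) rest inCode (s ≠ [])

def convert_setext_to_atx_alt (markdown : String) : String :=
  String.ofList (PySem.Chars.join ['\n']
    (goB [] (PySem.Chars.splitOn markdown.toList ['\n']) false false))

-- ===== PRECONDITION & SPEC =====
def Spec_convert_setext_to_atx (markdown : String) (out : String) : Prop := out = convert_setext_to_atx_alt markdown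
instance (markdown : String) (out : String) : Decidable (Spec_convert_setext_to_atx markdown out) := by unfold Spec_convert_setext_to_atx; infer_instance

-- ===== CLAIM (what is proved, stated in full; the proofs are below) =====
def Claim_equal_convert_setext_to_atx : Prop := ∀ (markdown : String), Dom_convert_setext_to_atx markdown → Spec_convert_setext_to_atx markdown (convert_setext_to_atx markdown)

-- ===== LEMMAS AND PROOFS =====

-- Python's s.count(c) for a single character c is List.count
theorem pv_go_single (c : Char) : ∀ (cs : List Char) (fuel acc : Nat), cs.length ≤ fuel →
    PySem.Chars.count.go [c] fuel cs acc = acc + cs.count c := by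
  intro cs
  induction cs with
  | nil => intro fuel acc h; cases fuel <;> simp [PySem.Chars.count.go]
  | cons h t ih =>
    intro fuel acc hle
    cases fuel with
    | zero => simp at hle
    | succ f =>
      simp only [PySem.Chars.count.go]
      by_cases hc : c = h
      · subst hc
        simp only [List.isPrefixOf, BEq.rfl, Bool.and_self, if_true,
          List.length_singleton, List.drop_one, List.tail_cons]
        rw [ih f _ (Nat.le_of_succ_le_succ hle)]
        simp; omega
      · simp [List.isPrefixOf, hc, ih f _ (Nat.le_of_succ_le_succ hle), Ne.symm hc]

theorem pv_count_single (c : Char) (cs : List Char) :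
    PySem.Chars.count cs [c] = cs.count c := by
  simp [PySem.Chars.count, pv_go_single c cs cs.length 0 le_rfl]

-- A's underline test (count == len) coincides with B's (s == s[0]*len(s))
theorem pv_cond_iff (c : Char) (t : List Char) :
    ((c = '=' ∨ c = '-') ∧ PySem.Chars.count (c :: t) [c] = (c :: t).length) ↔
      pvIsUnd (c :: t) = true := by
  rw [pv_count_single]
  simp [pvIsUnd, List.count_eq_length, List.eq_replicate_iff, and_comm]
  intro h
  constructor
  · intro h2; exact fun b hb => (h2 b hb).symm
  · intro h2; exact fun b hb => (h2 b hb).symm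

-- an underline never looks like a code fence
theorem pv_und_not_fence {s : List Char} (h : pvIsUnd s = true) :
    PySem.Chars.startswith s ['`', '`', '`'] = false := by
  match s with
  | [] => simp [pvIsUnd] at h
  | c :: t =>
    simp only [pvIsUnd, Bool.and_eq_true, decide_eq_true_eq, Bool.or_eq_true] at h
    rcases h.2 with hc | hc <;> subst hc <;>
      simp [PySem.Chars.startswith, List.isPrefixOf]

-- step lemmas for goA (the four shapes of A's loop body)
theorem goA_nil (inCode : Bool) : goA [] inCode = [] := by rw [goA.eq_def]

theorem goA_fence (s orig : List Char) (rest : List (List Char × List Char)) (inCode : Bool)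
    (hf : PySem.Chars.startswith s ['`', '`', '`'] = true) :
    goA ((s, orig) :: rest) inCode = orig :: goA rest (!inCode) := by
  rw [goA.eq_def]; simp [hf]

theorem goA_code (s orig : List Char) (rest : List (List Char × List Char))
    (hf : PySem.Chars.startswith s ['`', '`', '`'] = false) :
    goA ((s, orig) :: rest) true = orig :: goA rest true := by
  rw [goA.eq_def]; simp [hf]

theorem goA_heading (s orig : List Char) (c : Char) (t norig : List Char)
    (rest2 : List (List Char × List Char))
    (hf : PySem.Chars.startswith s ['`', '`', '`'] = false) (hs : s ≠ [])
    (hcond : (c = '=' ∨ c = '-') ∧ PySem.Chars.count (c :: t) [c] = (c :: t).length) :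
    goA ((s, orig) :: (c :: t, norig) :: rest2) false =
      (List.replicate (if c = '=' then 1 else 2) '#' ++ ' ' :: orig) :: goA rest2 false := by
  rw [goA.eq_def]; simp [hf, hs, hcond]

theorem goA_plain (s orig : List Char) (rest : List (List Char × List Char))
    (hf : PySem.Chars.startswith s ['`', '`', '`'] = false)
    (hno : s = [] ∨ rest = [] ∨ ∃ ns norig rest2, rest = (ns, norig) :: rest2 ∧
      ∀ c t, ns = c :: t → ¬((c = '=' ∨ c = '-') ∧ PySem.Chars.count ns [c] = ns.length)) :
    goA ((s, orig) :: rest) false = orig :: goA rest false := by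
  rcases hno with hs | hr | ⟨ns, norig, rest2, hr, hc⟩
  · subst hs
    rw [goA.eq_def]
    simp only [hf, Bool.false_eq_true, if_false]
    cases rest <;> rfl
  · subst hr
    rw [goA.eq_def]
    simp [hf]
  · subst hr
    rw [goA.eq_def]
    simp only [hf, Bool.false_eq_true, if_false]
    by_cases hs : s = []
    · simp [hs]
    · cases ns with
      | nil => simp [hs]
      | cons c t =>
        rw [if_pos hs]
        simp only [List.head?_cons]
        rw [if_neg (hc c t rfl)]

-- step lemmas for goB (the four branches of Source B's loop body)
theorem goB_nil (acc : List (List Char)) (inCode cand : Bool) :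
    goB acc [] inCode cand = acc.reverse := by simp [goB]

theorem goB_fence (acc : List (List Char)) (line : List Char) (rest : List (List Char))
    (inCode cand : Bool)
    (hf : PySem.Chars.startswith (PySem.Chars.strip line) ['`', '`', '`'] = true) :
    goB acc (line :: rest) inCode cand = goB (line :: acc) rest (!inCode) false := by
  simp [goB, hf]

theorem goB_code (acc : List (List Char)) (line : List Char) (rest : List (List Char))
    (cand : Bool)
    (hf : PySem.Chars.startswith (PySem.Chars.strip line) ['`', '`', '`'] = false) :
    goB acc (line :: rest) true cand = goB (line :: acc) rest true false := by
  simp [goB, hf]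

theorem goB_und (acc : List (List Char)) (line : List Char) (rest : List (List Char))
    (hf : PySem.Chars.startswith (PySem.Chars.strip line) ['`', '`', '`'] = false)
    (hu : pvIsUnd (PySem.Chars.strip line) = true) :
    goB acc (line :: rest) false true =
      goB (pvConvertLast (PySem.Chars.strip line) acc) rest false false := by
  simp [goB, hf, hu]

theorem goB_plain (acc : List (List Char)) (line : List Char) (rest : List (List Char))
    (cand : Bool)
    (hf : PySem.Chars.startswith (PySem.Chars.strip line) ['`', '`', '`'] = false)
    (hnc : cand = false ∨ pvIsUnd (PySem.Chars.strip line) = false) :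
    goB acc (line :: rest) false cand =
      goB (line :: acc) rest false (decide (PySem.Chars.strip line ≠ [])) := by
  rcases hnc with h | h <;> simp [goB, hf, h]

-- Main invariant, both loop shapes at once:
-- (1) with candidate = False, B's pass emits acc.reverse ++ (A's output on the rest);
-- (2) with candidate = True and a usable prev on top of acc, B's pass equals A's output
--     on prev :: rest (A's look-ahead at prev = B's look-back at the underline).
theorem pv_main : ∀ ls : List (List Char),
    (∀ (inCode : Bool) (acc : List (List Char)),
      goB acc ls inCode false =
        acc.reverse ++ goA (ls.map fun l => (PySem.Chars.strip l, l)) inCode) ∧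
    (∀ (acc : List (List Char)) (prev : List Char),
      PySem.Chars.strip prev ≠ [] →
      PySem.Chars.startswith (PySem.Chars.strip prev) ['`', '`', '`'] = false →
      goB (prev :: acc) ls false true =
        acc.reverse ++
          goA ((PySem.Chars.strip prev, prev) :: ls.map fun l => (PySem.Chars.strip l, l)) false) := by
  intro ls
  induction ls with
  | nil =>
    constructor
    · intro inCode acc; simp [goB_nil, goA_nil]
    · intro acc prev hne hfence
      rw [goB_nil, List.map_nil, goA_plain _ _ _ hfence (Or.inr (Or.inl rfl)), goA_nil]
      simp
  | cons l rest ih =>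
    obtain ⟨ih1, ih2⟩ := ih
    constructor
    · intro inCode acc
      by_cases hf : PySem.Chars.startswith (PySem.Chars.strip l) ['`', '`', '`'] = true
      · rw [goB_fence _ _ _ _ _ hf, ih1, List.map_cons, goA_fence _ _ _ _ hf]
        simp
      · rw [Bool.not_eq_true] at hf
        cases inCode with
        | true =>
          rw [goB_code _ _ _ _ hf, ih1, List.map_cons, goA_code _ _ _ hf]
          simp
        | false =>
          by_cases hs : PySem.Chars.strip l = []
          · rw [goB_plain _ _ _ _ hf (Or.inl rfl), List.map_cons,
              goA_plain _ _ _ hf (Or.inl hs)]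
            simp only [hs, ne_eq, not_true_eq_false, decide_false]
            rw [ih1]
            simp
          · rw [goB_plain _ _ _ _ hf (Or.inl rfl), List.map_cons]
            simp only [ne_eq, hs, not_false_eq_true, decide_true]
            exact ih2 acc l hs hf
    · intro acc prev hne hfence
      by_cases hu : pvIsUnd (PySem.Chars.strip l) = true
      · -- underline: A emits the heading and skips l; B rewrites prev in place
        have hlf := pv_und_not_fence hu
        obtain ⟨c, t, hct⟩ : ∃ c t, PySem.Chars.strip l = c :: t := by
          cases h : PySem.Chars.strip l with
          | nil => rw [h] at hu; simp [pvIsUnd] at hu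
          | cons c t => exact ⟨c, t, rfl⟩
        have hcond : (c = '=' ∨ c = '-') ∧
            PySem.Chars.count (c :: t) [c] = (c :: t).length := by
          rw [pv_cond_iff]; rw [hct] at hu; exact hu
        rw [goB_und _ _ _ hlf hu, ih1, List.map_cons, hct,
          goA_heading _ _ _ _ _ _ hfence hne hcond]
        simp only [pvConvertLast, List.head?_cons]
        rcases hcond.1 with hc | hc
        · subst hc; simp
        · have hcne : ¬ (c = '=') := by subst hc; decide
          simp [hcne]
      · -- not an underline: A appends prev and reconsiders l from scratch
        have hstep : goA ((PySem.Chars.strip prev, prev) ::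
              (l :: rest).map fun l => (PySem.Chars.strip l, l)) false =
            prev :: goA ((l :: rest).map fun l => (PySem.Chars.strip l, l)) false := by
          rw [List.map_cons, goA_plain _ _ _ hfence]
          refine Or.inr (Or.inr ⟨_, _, _, rfl, ?_⟩)
          intro c t hct hcond
          rw [hct] at hcond hu
          rw [pv_cond_iff] at hcond
          exact hu hcond
        rw [hstep]
        by_cases hf : PySem.Chars.startswith (PySem.Chars.strip l) ['`', '`', '`'] = true
        · rw [goB_fence _ _ _ _ _ hf, ih1, List.map_cons, goA_fence _ _ _ _ hf]
          simp
        · rw [Bool.not_eq_true] at hf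
          by_cases hs : PySem.Chars.strip l = []
          · rw [goB_plain _ _ _ _ hf (Or.inr (by simpa [Bool.not_eq_true] using hu)),
              List.map_cons, goA_plain _ _ _ hf (Or.inl hs)]
            simp only [hs, ne_eq, not_true_eq_false, decide_false]
            rw [ih1]
            simp
          · rw [goB_plain _ _ _ _ hf (Or.inr (by simpa [Bool.not_eq_true] using hu)),
              List.map_cons]
            simp only [ne_eq, hs, not_false_eq_true, decide_true]
            rw [ih2 (prev :: acc) l hs hf]
            simp

-- ===== VERDICT (by name: the statement is the Claim_ definition above) =====
theorem convert_setext_to_atx_spec : Claim_equal_convert_setext_to_atx := by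
  intro markdown _
  unfold Spec_convert_setext_to_atx convert_setext_to_atx convert_setext_to_atx_alt
  by_cases hmd : markdown = ""
  · subst hmd; decide
  · rw [if_neg hmd, (pv_main (PySem.Chars.splitOn markdown.toList ['\n'])).1 false []]
    simp
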